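-- pv_equiv track=rewrite | github.com/avigailtaylor/GeneFEAST | genefeast/gf_base.py | find_terms_to_remove
-- ===== SOURCE A (Python) =====
-- def find_terms_to_remove_aux(term_genes_dict, min_num_genes):
--     terms_to_remove = []
--
--     for t in term_genes_dict:
--         if(len(term_genes_dict[t]) < min_num_genes):
--             terms_to_remove.append(t)
--
--     return terms_to_remove
--
-- def find_terms_to_remove(exp_term_genes_dict, min_num_genes):
--     term_genes_dict = {}
--
--     for (e, t) in exp_term_genes_dict:
--
--         if t in term_genes_dict:
--             term_genes_dict[t] = term_genes_dict[t].union(exp_term_genes_dict[(e, t)])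
--         else:
--             term_genes_dict[t] = exp_term_genes_dict[(e, t)]
--
--
--     terms_to_remove = find_terms_to_remove_aux(term_genes_dict, min_num_genes)
--
--     return(term_genes_dict, terms_to_remove)
-- ===== SOURCE B (Python) =====
-- def find_terms_to_remove(exp_term_genes_dict, min_num_genes):
--     # Pass 1: group the gene-sets of each term, preserving first-seen term order.
--     groups = {}
--     for (e, t) in exp_term_genes_dict:
--         groups.setdefault(t, []).append(exp_term_genes_dict[(e, t)])
--     # Pass 2: reduce each group by set.union and flag small results in the same loop.
--     term_genes_dict = {}
--     terms_to_remove = []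
--     for t, sets in groups.items():
--         merged = sets[0]
--         for s in sets[1:]:
--             merged = merged.union(s)
--         term_genes_dict[t] = merged
--         if len(merged) < min_num_genes:
--             terms_to_remove.append(t)
--     return (term_genes_dict, terms_to_remove)
-- ===== Notes on version B (the rewrite author's own statement) =====
-- stated objective: alternative
-- what changed: B groups the gene-sets by term in a first pass and then, in one second pass over the groups, reduces each group with set.union and flags small terms, instead of A's interleaved union-on-insert dict build followed by a separate scan; a single-occurrence term keeps the original set object and no input set is mutated.
import Mathlib
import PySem

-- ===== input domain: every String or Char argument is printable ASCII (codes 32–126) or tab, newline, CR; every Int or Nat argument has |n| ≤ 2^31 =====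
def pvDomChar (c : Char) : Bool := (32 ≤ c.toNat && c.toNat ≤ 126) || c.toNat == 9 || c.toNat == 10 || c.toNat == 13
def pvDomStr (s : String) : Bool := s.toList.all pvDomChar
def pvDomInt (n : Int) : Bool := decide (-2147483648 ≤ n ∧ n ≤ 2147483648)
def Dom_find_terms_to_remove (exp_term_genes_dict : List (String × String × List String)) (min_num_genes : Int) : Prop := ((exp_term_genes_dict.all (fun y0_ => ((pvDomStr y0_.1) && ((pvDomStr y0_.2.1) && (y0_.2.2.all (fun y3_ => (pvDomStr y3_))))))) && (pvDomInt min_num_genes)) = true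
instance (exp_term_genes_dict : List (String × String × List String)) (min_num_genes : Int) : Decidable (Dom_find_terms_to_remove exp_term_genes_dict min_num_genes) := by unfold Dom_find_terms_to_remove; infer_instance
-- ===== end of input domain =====

-- B replaces A's interleaved union-on-insert dict build plus separate scan by a group-by-term
-- pass followed by one reduce-and-flag pass (alternative decomposition, same cost).
-- The input dict (keys (e,t), values gene-SETS) is the assoc list; its Python-dict view
-- (duplicate keys overwritten in place, values as sets) is shared by both ports as pvEDict.

-- ===== PORT A =====
-- the Python dict argument itself: keys (e, t), values the gene sets
def pvEDict (exp_term_genes_dict : List (String × String × List String)) :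
    PySem.Dict (String × String) (List String) :=
  PySem.Dict.ofList (exp_term_genes_dict.map (fun r => ((r.1, r.2.1), r.2.2)))

-- exp_term_genes_dict[(e, t)] as the set it holds
def pvVal (exp_term_genes_dict : List (String × String × List String)) (e t : String) :
    List String :=
  PySem.Set.ofList ((pvEDict exp_term_genes_dict).getD (e, t) [])

def find_terms_to_remove_aux (term_genes_dict : PySem.Dict String (List String))
    (min_num_genes : Int) : List String :=
  term_genes_dict.keys.foldl
    (fun acc t =>
      if PySem.Set.len (term_genes_dict.getD t []) < min_num_genes then acc ++ [t] else acc) []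

def find_terms_to_remove (exp_term_genes_dict : List (String × String × List String)) (min_num_genes : Int) : (List (String × List String)) × List String :=
  let term_genes_dict :=
    exp_term_genes_dict.foldl
      (fun d r =>
        if d.contains r.2.1 then
          d.modify r.2.1 [] (fun s => PySem.Set.union s (pvVal exp_term_genes_dict r.1 r.2.1))
        else
          d.insert r.2.1 (pvVal exp_term_genes_dict r.1 r.2.1))
      PySem.Dict.empty
  (term_genes_dict.items, find_terms_to_remove_aux term_genes_dict min_num_genes)

-- ===== PORT B =====
-- merged = sets[0]; for s in sets[1:]: merged = merged.union(s)
def pvReduceUnion (sets : List (List String)) : List String :=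
  sets.tail.foldl PySem.Set.union (sets.headD [])

def find_terms_to_remove_alt (exp_term_genes_dict : List (String × String × List String)) (min_num_genes : Int) : (List (String × List String)) × List String :=
  let groups :=
    exp_term_genes_dict.foldl
      (fun g r => g.modify r.2.1 [] (fun gs => gs ++ [pvVal exp_term_genes_dict r.1 r.2.1]))
      PySem.Dict.empty
  let res :=
    groups.items.foldl
      (fun acc p =>
        let merged := pvReduceUnion p.2
        (acc.1.insert p.1 merged,
         if PySem.Set.len merged < min_num_genes then acc.2 ++ [p.1] else acc.2))
      ((PySem.Dict.empty : PySem.Dict String (List String)), ([] : List String))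
  (res.1.items, res.2)

-- ===== PRECONDITION & SPEC =====
def Spec_find_terms_to_remove (exp_term_genes_dict : List (String × String × List String)) (min_num_genes : Int) (out : (List (String × List String)) × List String) : Prop := out = find_terms_to_remove_alt exp_term_genes_dict min_num_genes
instance (exp_term_genes_dict : List (String × String × List String)) (min_num_genes : Int) (out : (List (String × List String)) × List String) : Decidable (Spec_find_terms_to_remove exp_term_genes_dict min_num_genes out) := by unfold Spec_find_terms_to_remove; infer_instance

-- ===== CLAIM (what is proved, stated in full; the proofs are below) =====
def Claim_equal_find_terms_to_remove : Prop := ∀ (exp_term_genes_dict : List (String × String × List String)) (min_num_genes : Int), Dom_find_terms_to_remove exp_term_genes_dict min_num_genes → Spec_find_terms_to_remove exp_term_genes_dict min_num_genes (find_terms_to_remove exp_term_genes_dict min_num_genes)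

-- ===== LEMMAS AND PROOFS =====

-- values of a dict, mapped in place
def pvMapVals (f : List (List String) → List String) (d : PySem.Dict String (List (List String))) :
    PySem.Dict String (List String) :=
  PySem.Dict.mk (d.items.map (fun p => (p.1, f p.2)))

theorem contains_pvMapVals (f : List (List String) → List String)
    (d : PySem.Dict String (List (List String))) (k : String) :
    (pvMapVals f d).contains k = d.contains k := by
  simp only [pvMapVals, PySem.Dict.contains, List.any_map]
  rfl

theorem get?_pvMapVals (f : List (List String) → List String)
    (d : PySem.Dict String (List (List String))) (k : String) :
    (pvMapVals f d).get? k = (d.get? k).map f := by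
  simp only [pvMapVals, PySem.Dict.get?, List.find?_map]
  cases h : d.items.find? (fun p => (p.1 == k)) <;> simp_all [Function.comp_def]
  exact h

theorem insert_pvMapVals (f : List (List String) → List String)
    (d : PySem.Dict String (List (List String))) (k : String) (v : List (List String)) :
    pvMapVals f (d.insert k v) = (pvMapVals f d).insert k (f v) := by
  simp only [PySem.Dict.insert, contains_pvMapVals]
  by_cases h : d.contains k
  · simp only [h, if_true, pvMapVals, List.map_map]
    congr 1
    apply List.map_congr_left
    intro p _
    by_cases hp : p.1 == k <;> simp [hp, Function.comp]
  · simp [h, pvMapVals]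

theorem pvReduceUnion_append (gs : List (List String)) (v : List String) (h : gs ≠ []) :
    pvReduceUnion (gs ++ [v]) = PySem.Set.union (pvReduceUnion gs) v := by
  cases gs with
  | nil => exact absurd rfl h
  | cons g0 rest => simp [pvReduceUnion]

-- A's accumulator stays the value-wise reduction of B's groups accumulator
theorem pv_fold_inv (ed : List (String × String × List String))
    (l : List (String × String × List String)) (g : PySem.Dict String (List (List String)))
    (hne : ∀ p ∈ g.items, p.2 ≠ []) :
    l.foldl
      (fun d r =>
        if d.contains r.2.1 then
          d.modify r.2.1 [] (fun s => PySem.Set.union s (pvVal ed r.1 r.2.1))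
        else
          d.insert r.2.1 (pvVal ed r.1 r.2.1))
      (pvMapVals pvReduceUnion g)
    = pvMapVals pvReduceUnion
        (l.foldl (fun g r => g.modify r.2.1 [] (fun gs => gs ++ [pvVal ed r.1 r.2.1])) g) := by
  induction l generalizing g with
  | nil => rfl
  | cons r rest ih =>
    simp only [List.foldl_cons]
    have hstep :
        (if (pvMapVals pvReduceUnion g).contains r.2.1 then
          (pvMapVals pvReduceUnion g).modify r.2.1 []
            (fun s => PySem.Set.union s (pvVal ed r.1 r.2.1))
        else
          (pvMapVals pvReduceUnion g).insert r.2.1 (pvVal ed r.1 r.2.1))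
        = pvMapVals pvReduceUnion (g.modify r.2.1 [] (fun gs => gs ++ [pvVal ed r.1 r.2.1])) := by
      rw [contains_pvMapVals]
      by_cases hc : g.contains r.2.1
      · obtain ⟨gs, hgs⟩ : ∃ gs, g.get? r.2.1 = some gs := by
          have := PySem.Dict.contains_eq_isSome_get? g r.2.1
          rw [hc] at this
          exact Option.isSome_iff_exists.mp this.symm
        have hmem : (r.2.1, gs) ∈ g.items := PySem.Dict.mem_items_of_get?_eq_some g hgs
        have hgsne : gs ≠ [] := hne _ hmem
        simp only [hc, if_true, PySem.Dict.modify, insert_pvMapVals,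
          PySem.Dict.getD_eq_get?_getD, get?_pvMapVals, hgs, Option.map_some, Option.getD_some]
        rw [pvReduceUnion_append gs _ hgsne]
      · simp only [hc, Bool.false_eq_true, if_false, PySem.Dict.modify,
          PySem.Dict.getD_eq_get?_getD]
        have hg : g.get? r.2.1 = none :=
          (PySem.Dict.get?_eq_none_iff_contains g r.2.1).mpr (by simpa using hc)
        rw [hg, insert_pvMapVals]
        rfl
    rw [hstep]
    apply ih
    intro p hp
    have : p = (r.2.1, g.getD r.2.1 [] ++ [pvVal ed r.1 r.2.1]) ∨ (p ∈ g.items ∧ p.1 ≠ r.2.1) :=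
      (PySem.Dict.mem_items_insert _ _ _ _).mp hp
    rcases this with h | ⟨h, _⟩
    · subst h; simp
    · exact hne _ h

theorem keys_pvMapVals (f : List (List String) → List String)
    (d : PySem.Dict String (List (List String))) :
    (pvMapVals f d).keys = d.keys := by
  simp [pvMapVals, PySem.Dict.keys, List.map_map, Function.comp]

-- keys stay unique through B's grouping fold
theorem nodup_keys_groups (ed : List (String × String × List String))
    (l : List (String × String × List String)) (g : PySem.Dict String (List (List String)))
    (h : g.keys.Nodup) :
    (l.foldl (fun g r => g.modify r.2.1 [] (fun gs => gs ++ [pvVal ed r.1 r.2.1])) g).keys.Nodup := by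
  induction l generalizing g with
  | nil => exact h
  | cons r rest ih =>
    simp only [List.foldl_cons]
    exact ih _ (PySem.Dict.nodup_keys_insert _ _ _ h)

-- A's aux, on a dict with unique keys, is the items-level filter fold
theorem aux_eq_items_fold (d : PySem.Dict String (List String)) (m : Int)
    (h : d.keys.Nodup) :
    find_terms_to_remove_aux d m
    = d.items.foldl
        (fun acc p => if PySem.Set.len p.2 < m then acc ++ [p.1] else acc) [] := by
  unfold find_terms_to_remove_aux
  have hk : d.keys = d.items.map Prod.fst := by simp [PySem.Dict.keys]
  rw [hk, List.foldl_map]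
  apply PySem.List.foldl_congr_mem
  intro acc p hp
  have : d.getD p.1 [] = p.2 := PySem.Dict.getD_of_mem_items d (by simpa using hp) h []
  rw [this]

-- a fold carrying an independent pair splits
theorem foldl_pair_split {α β γ : Type} (l : List α) (f1 : β → α → β) (f2 : γ → α → γ)
    (b : β) (c : γ) :
    l.foldl (fun acc x => (f1 acc.1 x, f2 acc.2 x)) (b, c) = (l.foldl f1 b, l.foldl f2 c) := by
  induction l generalizing b c with
  | nil => rfl
  | cons x xs ih => simp only [List.foldl_cons]; exact ih _ _

-- ===== VERDICT (by name: the statement is the Claim_ definition above) =====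
theorem find_terms_to_remove_spec : Claim_equal_find_terms_to_remove := by
  intro l m _
  unfold Spec_find_terms_to_remove find_terms_to_remove find_terms_to_remove_alt
  dsimp only
  have hfold := pv_fold_inv l l PySem.Dict.empty (by intro p hp; simp [PySem.Dict.empty] at hp)
  have hempty : pvMapVals pvReduceUnion PySem.Dict.empty = PySem.Dict.empty := rfl
  rw [hempty] at hfold
  set g := l.foldl (fun g r => g.modify r.2.1 [] (fun gs => gs ++ [pvVal l r.1 r.2.1]))
      PySem.Dict.empty with hg
  have hnodup : g.keys.Nodup := nodup_keys_groups l l _ (by simp [PySem.Dict.keys, PySem.Dict.empty])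
  rw [hfold]
  rw [foldl_pair_split g.items (fun d p => d.insert p.1 (pvReduceUnion p.2))
        (fun acc2 p => if PySem.Set.len (pvReduceUnion p.2) < m then acc2 ++ [p.1] else acc2)
        PySem.Dict.empty []]
  have hitems :
      (g.items.foldl (fun d p => d.insert p.1 (pvReduceUnion p.2)) PySem.Dict.empty).items
      = g.items.map (fun p => (p.1, pvReduceUnion p.2)) := by
    have := PySem.Dict.items_foldl_insert_fresh (l := g.items) (k := Prod.fst)
      (v := fun p => pvReduceUnion p.2) (d := PySem.Dict.empty)
      (by intro a _; simp [PySem.Dict.contains, PySem.Dict.empty])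
      (by simpa [PySem.Dict.keys] using hnodup)
    simpa [PySem.Dict.empty] using this
  dsimp only
  rw [hitems]
  simp only [Prod.mk.injEq]
  constructor
  · rfl
  · rw [aux_eq_items_fold _ m (by rw [keys_pvMapVals]; exact hnodup)]
    simp only [pvMapVals, List.foldl_map]
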